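-- pv_equiv track=rewrite | github.com/iinsouciant/AdventOfCode2024 | day05/solution.py | getRulesDict
-- ===== SOURCE A (Python) =====
-- def getRulesDict(instructions):
--     rules = {}
--     for instruction in instructions.split('\n'):
--         rule = instruction.split('|')
--         if rule[0] in rules:
--             rules[rule[0]].append(rule[1])
--         else:
--             rules[rule[0]] = [rule[1]]
--     return rules
-- ===== SOURCE B (Python) =====
-- def getRulesDict(instructions):
--     # two-phase: parse all (key, value) pairs first, then group values per first-seen key
--     pairs = []
--     for line in instructions.split('\n'):
--         p = line.split('|')
--         pairs.append((p[0], p[1]))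
--     return {k: [v for k2, v in pairs if k2 == k] for k in dict.fromkeys(k for k, _ in pairs)}
-- ===== Notes on version B (the rewrite author's own statement) =====
-- stated objective: alternative
-- what changed: Replaces A's incremental dict accumulation (branching on key presence per line) with a two-phase pass: parse all (key,value) pairs first, then build the dict by grouping values per first-seen key.
import Mathlib
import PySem

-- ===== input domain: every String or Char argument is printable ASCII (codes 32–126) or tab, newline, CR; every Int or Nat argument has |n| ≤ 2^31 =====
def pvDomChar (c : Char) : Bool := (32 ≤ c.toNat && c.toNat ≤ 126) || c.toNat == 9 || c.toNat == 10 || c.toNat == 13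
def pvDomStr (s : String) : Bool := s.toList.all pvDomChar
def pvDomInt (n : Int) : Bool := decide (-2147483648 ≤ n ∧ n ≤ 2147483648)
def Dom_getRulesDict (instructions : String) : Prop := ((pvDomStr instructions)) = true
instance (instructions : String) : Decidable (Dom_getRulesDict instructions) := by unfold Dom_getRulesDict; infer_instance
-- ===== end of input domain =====

-- B replaces A's incremental first-seen dict accumulation by a parse-then-group two-phase pass (alternative decomposition, same values).

-- ===== PORT A =====
-- s.split(sep) with the literal nonempty seps "\n" / "|" never raises: split? is always `some`, `.getD []` just unwraps it.
def getRulesDict (instructions : String) : List (String × List String) :=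
  (((PySem.Str.split? instructions "\n").getD []).foldl (fun rules instruction =>
      let rule := (PySem.Str.split? instruction "|").getD []
      let k := PySem.List.pyGetD rule 0 ""
      if rules.contains k then
        rules.modify k [] (fun vs => vs ++ [PySem.List.pyGetD rule 1 ""])
      else
        rules.insert k [PySem.List.pyGetD rule 1 ""])
    PySem.Dict.empty).items

-- ===== PORT B =====
def getRulesDict_alt (instructions : String) : List (String × List String) :=
  let pairs := ((PySem.Str.split? instructions "\n").getD []).map (fun line =>
      let p := (PySem.Str.split? line "|").getD []
      (PySem.List.pyGetD p 0 "", PySem.List.pyGetD p 1 ""))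
  (PySem.List.dedup (pairs.map (fun q => q.1))).map (fun k =>
      (k, (pairs.filter (fun q => q.1 == k)).map (fun q => q.2)))

-- ===== PRECONDITION & SPEC =====
-- Pre_ excludes exactly the inputs where some line contains no '|' (its split has a single piece): there Python A raises IndexError on rule[1].
def Pre_getRulesDict (instructions : String) : Prop :=
  ∀ l ∈ (PySem.Str.split? instructions "\n").getD [], 2 ≤ ((PySem.Str.split? l "|").getD []).length
instance (instructions : String) : Decidable (Pre_getRulesDict instructions) := by unfold Pre_getRulesDict; infer_instance
def pvWitness_getRulesDict : String := "1|2\n1|3\n4|2"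

def Spec_getRulesDict (instructions : String) (out : List (String × List String)) : Prop := out = getRulesDict_alt instructions
instance (instructions : String) (out : List (String × List String)) : Decidable (Spec_getRulesDict instructions out) := by unfold Spec_getRulesDict; infer_instance

-- ===== CLAIM (what is proved, stated in full; the proofs are below) =====
def Claim_equal_getRulesDict : Prop := ∀ (instructions : String), Dom_getRulesDict instructions → Pre_getRulesDict instructions → Spec_getRulesDict instructions (getRulesDict instructions)

-- ===== LEMMAS AND PROOFS =====

-- A's loop, rephrased over the parsed (key, value) pairs: both branches are one `modify`.
theorem getRulesDict_foldl_pairs (lines : List String) :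
    lines.foldl (fun rules instruction =>
      let rule := (PySem.Str.split? instruction "|").getD []
      let k := PySem.List.pyGetD rule 0 ""
      if rules.contains k then
        rules.modify k [] (fun vs => vs ++ [PySem.List.pyGetD rule 1 ""])
      else
        rules.insert k [PySem.List.pyGetD rule 1 ""]) PySem.Dict.empty
    = (lines.map (fun line =>
        let p := (PySem.Str.split? line "|").getD []
        ((PySem.List.pyGetD p 0 "", PySem.List.pyGetD p 1 "") : String × String))).foldl
        (fun d q => d.modify q.1 [] (fun vs => vs ++ [q.2])) PySem.Dict.empty := by
  rw [List.foldl_map]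
  apply PySem.List.foldl_congr_mem
  intro d line _
  simp only [PySem.Dict.modify]
  by_cases h : d.contains (PySem.List.pyGetD ((PySem.Str.split? line "|").getD []) 0 "")
  · simp [h]
  · simp [h, PySem.Dict.getD_of_not_contains _ _ (by simpa using h)]

-- grouping a pair list through the modify-fold dict equals group-by-first-seen-key
theorem items_foldl_modify_group (pairs : List (String × String)) :
    (pairs.foldl (fun d q => d.modify q.1 [] (fun vs => vs ++ [q.2])) PySem.Dict.empty).items
    = (PySem.List.dedup (pairs.map (fun q => q.1))).map (fun k =>
        (k, (pairs.filter (fun q => q.1 == k)).map (fun q => q.2))) := by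
  have hnodup : ((pairs.foldl (fun d q => d.modify q.1 [] (fun vs => vs ++ [q.2])) PySem.Dict.empty)).keys.Nodup :=
    PySem.Dict.nodup_keys_foldl_modify_key pairs (fun q => q.1) [] (fun _ q vs => vs ++ [q.2]) PySem.Dict.empty (by simp)
  rw [PySem.Dict.items_eq_map_keys _ hnodup []]
  rw [PySem.Dict.keys_foldl_modify_key pairs (fun q => q.1) [] (fun _ q vs => vs ++ [q.2]) PySem.Dict.empty]
  have hkeys : PySem.Set.update (PySem.Dict.empty : PySem.Dict String (List String)).keys (pairs.map (fun q => q.1))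
      = PySem.List.dedup (pairs.map (fun q => q.1)) := by
    rw [PySem.List.dedup_eq_ofList, PySem.Set.ofList_eq_foldl, PySem.Dict.keys_empty]
    rfl
  rw [hkeys]
  apply List.map_congr_left
  intro k _
  rw [PySem.Dict.getD_foldl_modify_append]
  simp

-- ===== VERDICT (by name: the statement is the Claim_ definition above) =====
theorem getRulesDict_spec : Claim_equal_getRulesDict := by
  intro ins _ _
  unfold Spec_getRulesDict
  simp only [getRulesDict, getRulesDict_alt]
  rw [getRulesDict_foldl_pairs, items_foldl_modify_group]
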